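-- pv_equiv track=rewrite | github.com/tehKruser/max-product-sum | MaxProductSum/main.py | MaxProdSum
-- ===== SOURCE A (Python) =====
-- def MaxProdSum(Array):
--     MaxArray = []
--
--     for i in range(0, len(Array)):
--         if (i==0):
--             MaxArray.append(Array[i])
--         elif(i==1):
--             val1 = Array[i]*Array[i-1]
--             val2 = Array[i]+Array[i-1]
--             max_val = max(val1, val2)
--             MaxArray.append(max_val)
--         else:
--             val1 = Array[i] * Array[i - 1] + MaxArray[i-2]
--             val2 = Array[i] + MaxArray[i-1]
--             max_val = max(val1, val2)
--             MaxArray.append(max_val)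
--     return MaxArray[-1]
-- ===== SOURCE B (Python) =====
-- def MaxProdSum(Array):
--     # Reduction: answer = sum(Array) + best total "gain" from pairing disjoint
--     # adjacent pairs, where pairing (p, q) replaces p+q by p*q (gain p*q-p-q).
--     # Best gain = max-weight independent edge set, house-robber style.
--     gains = [p * q - p - q for p, q in zip(Array, Array[1:])]
--     take = skip = 0
--     for g in gains:
--         take, skip = skip + g, max(take, skip)
--     return sum(Array) + max(take, skip)
-- ===== Notes on version B (the rewrite author's own statement) =====
-- stated objective: alternative
-- what changed: Replaces A's prefix DP on the original recurrence (MaxArray table indexed by i-1/i-2) by a reduction: answer = sum(Array) plus a max-weight independent edge set (house-robber pass) over the pairing gains p*q-p-q of adjacent pairs.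
-- crash fix: On the empty list A raises IndexError (MaxArray[-1]) while B returns 0, the empty sum. — e.g. on MaxProdSum([]): A raises IndexError, B returns 0
import Mathlib
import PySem

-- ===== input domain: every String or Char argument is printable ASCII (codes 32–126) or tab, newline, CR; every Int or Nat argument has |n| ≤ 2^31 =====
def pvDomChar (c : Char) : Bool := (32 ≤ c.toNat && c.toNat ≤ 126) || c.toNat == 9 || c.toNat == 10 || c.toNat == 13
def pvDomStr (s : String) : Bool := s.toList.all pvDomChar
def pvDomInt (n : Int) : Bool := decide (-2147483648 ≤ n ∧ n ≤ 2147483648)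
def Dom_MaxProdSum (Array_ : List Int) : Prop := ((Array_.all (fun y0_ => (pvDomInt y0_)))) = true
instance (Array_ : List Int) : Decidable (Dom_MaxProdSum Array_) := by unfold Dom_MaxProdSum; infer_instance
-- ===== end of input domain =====

-- B reformulates the task: answer = sum(Array) + max-weight independent edge set over the
-- pairing gains p*q-p-q (house-robber pass), instead of A's prefix DP table.
-- Return-value equivalence on nonempty lists; A raises IndexError on [].

-- ===== PORT A =====
-- Loop body of A's `for i in range(0, len(Array))`. pyGetD _ _ 0 renders the subscripts
-- Array[i], Array[i-1], MaxArray[i-2], MaxArray[i-1]: exact because every index the loop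
-- reads is in range; the final MaxArray[-1] is in range exactly when Array_ ≠ [] (Pre_).
def stepA (Array_ : List Int) (MaxArray : List Int) (i : Int) : List Int :=
  if i = 0 then
    MaxArray ++ [PySem.List.pyGetD Array_ i 0]
  else if i = 1 then
    let val1 := PySem.List.pyGetD Array_ i 0 * PySem.List.pyGetD Array_ (i-1) 0
    let val2 := PySem.List.pyGetD Array_ i 0 + PySem.List.pyGetD Array_ (i-1) 0
    MaxArray ++ [max val1 val2]
  else
    let val1 := PySem.List.pyGetD Array_ i 0 * PySem.List.pyGetD Array_ (i-1) 0 +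
                PySem.List.pyGetD MaxArray (i-2) 0
    let val2 := PySem.List.pyGetD Array_ i 0 + PySem.List.pyGetD MaxArray (i-1) 0
    MaxArray ++ [max val1 val2]

def MaxProdSum (Array_ : List Int) : Int :=
  let MaxArray := (PySem.List.pyRange 0 (Array_.length : Int) 1).foldl (stepA Array_) []
  PySem.List.pyGetD MaxArray (-1) 0

-- ===== PORT B =====
-- B's gains list comprehension over zip(Array, Array[1:]), then the house-robber fold
-- with state (take, skip), then sum(Array) + max(take, skip).
def gainsB (Array_ : List Int) : List Int :=
  (Array_.zip (Array_.drop 1)).map (fun pq => pq.1 * pq.2 - pq.1 - pq.2)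

def stepB (s : Int × Int) (g : Int) : Int × Int :=
  (s.2 + g, max s.1 s.2)

def MaxProdSum_alt (Array_ : List Int) : Int :=
  let st := (gainsB Array_).foldl stepB (0, 0)
  Array_.sum + max st.1 st.2

-- ===== PRECONDITION & SPEC =====
-- A raises IndexError on the empty list (MaxArray[-1]); nothing else raises.
def Pre_MaxProdSum (Array_ : List Int) : Prop := Array_ ≠ []
instance (Array_ : List Int) : Decidable (Pre_MaxProdSum Array_) := by unfold Pre_MaxProdSum; infer_instance
def pvWitness_MaxProdSum : List Int := [3, -1, 4, 2]

-- On the empty list A raises IndexError while B returns 0, the empty sum.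
def Raises_MaxProdSum (Array_ : List Int) : Prop := Array_ = []
instance (Array_ : List Int) : Decidable (Raises_MaxProdSum Array_) := by unfold Raises_MaxProdSum; infer_instance
def pvRaiseWitness_MaxProdSum : List Int := []
def pvRaiseWitnessOut_MaxProdSum : Int := 0

def Spec_MaxProdSum (Array_ : List Int) (out : Int) : Prop := out = MaxProdSum_alt Array_
instance (Array_ : List Int) (out : Int) : Decidable (Spec_MaxProdSum Array_ out) := by unfold Spec_MaxProdSum; infer_instance

-- ===== CLAIM (what is proved, stated in full; the proofs are below) =====
def Claim_equal_MaxProdSum : Prop := ∀ (Array_ : List Int), Dom_MaxProdSum Array_ → Pre_MaxProdSum Array_ → Spec_MaxProdSum Array_ (MaxProdSum Array_)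
def Claim_raises_MaxProdSum : Prop := (∀ (Array_ : List Int), Dom_MaxProdSum Array_ → Raises_MaxProdSum Array_ → ¬ Pre_MaxProdSum Array_) ∧ (Dom_MaxProdSum (pvRaiseWitness_MaxProdSum) ∧ Raises_MaxProdSum (pvRaiseWitness_MaxProdSum) ∧ MaxProdSum_alt (pvRaiseWitness_MaxProdSum) = pvRaiseWitnessOut_MaxProdSum)

-- ===== LEMMAS AND PROOFS =====

-- A's table after the first j loop iterations.
def AM (Array_ : List Int) (j : Nat) : List Int :=
  (PySem.List.pyRange 0 (j : Int) 1).foldl (stepA Array_) []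

-- B's house-robber state after the first j gains of x :: xs.
def St (x : Int) (xs : List Int) (j : Nat) : Int × Int :=
  ((gainsB (x :: xs)).take j).foldl stepB (0, 0)

-- sum of the first j+1 elements of x :: xs
def Ssum (x : Int) (xs : List Int) (j : Nat) : Int :=
  ((x :: xs).take (j+1)).sum

lemma AM_succ (Array_ : List Int) (j : Nat) :
    AM Array_ (j+1) = stepA Array_ (AM Array_ j) (j : Int) := by
  unfold AM
  rw [show ((j+1 : Nat) : Int) = (j : Int) + 1 by push_cast; ring,
      PySem.List.pyRange_one_succ_right (by positivity), List.foldl_append]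
  rfl

lemma AM_zero (Array_ : List Int) : AM Array_ 0 = [] := by
  simp [AM, PySem.List.pyRange_one_eq_nil]

lemma St_succ (x : Int) (xs : List Int) (j : Nat) (hj : j < xs.length) :
    St x xs (j+1) = stepB (St x xs j)
      ((x :: xs).getD j 0 * (x :: xs).getD (j+1) 0
        - (x :: xs).getD j 0 - (x :: xs).getD (j+1) 0) := by
  unfold St
  have hz : j < ((x :: xs).zip xs).length := by simpa [List.length_zip] using hj
  have hg : j < (gainsB (x :: xs)).length := by simpa [gainsB, List.length_zip] using hj
  have hj1 : j < (x :: xs).length := by simp; omega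
  have hj2 : j + 1 < (x :: xs).length := by simp; omega
  rw [List.take_add_one, List.getElem?_eq_getElem hg]
  simp [gainsB, List.foldl_append, List.getElem_zip, List.getD,
        List.getElem?_eq_getElem hj1, List.getElem?_eq_getElem hj2]

lemma Ssum_succ (x : Int) (xs : List Int) (j : Nat) (hj : j < xs.length) :
    Ssum x xs (j+1) = Ssum x xs j + (x :: xs).getD (j+1) 0 := by
  unfold Ssum
  have hj2 : j + 1 < (x :: xs).length := by simp; omega
  simp only [List.take_succ_cons, List.sum_cons]
  rw [List.take_add_one, List.getElem?_eq_getElem hj, List.sum_append]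
  simp [List.getD, List.getElem?_eq_getElem hj2, add_assoc]

lemma int_add_max (c a b : Int) : c + max a b = max (c + a) (c + b) := by
  rcases le_total a b with h | h <;> simp [h]

-- main invariant: A's table ends in [f(j-1), f(j)] where
-- f(j-1) = Ssum (j-1) + skip_j and f(j) = Ssum j + max take_j skip_j.
lemma inv (x : Int) (xs : List Int) (j : Nat) (h1 : 1 ≤ j) (hj : j ≤ xs.length) :
    ∃ P : List Int, AM (x :: xs) (j+1) =
        P ++ [Ssum x xs (j-1) + (St x xs j).2,
              Ssum x xs j + max (St x xs j).1 (St x xs j).2] ∧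
      P.length = j - 1 := by
  induction j with
  | zero => omega
  | succ j ih =>
    by_cases hj1 : j = 0
    · -- base: j+1 = 1
      subst hj1
      obtain ⟨y, ys, rfl⟩ : ∃ y ys, xs = y :: ys := by
        cases xs with
        | nil => simp at hj
        | cons y ys => exact ⟨y, ys, rfl⟩
      refine ⟨[], ?_, rfl⟩
      rw [AM_succ, AM_succ, AM_zero]
      have hS : St x (y :: ys) 1 = (x * y - x - y, 0) := by
        rw [show (1 : Nat) = 0 + 1 from rfl, St_succ x (y :: ys) 0 (by simp)]
        simp [St, stepB, List.getD]
      rw [hS]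
      simp only [stepA]
      norm_num [PySem.List.pyGetD_zero_cons, PySem.List.pyGetD, Ssum]
      rw [int_add_max]
      congr 1 <;> ring
    · have h1' : 1 ≤ j := by omega
      obtain ⟨P, hP, hlen⟩ := ih h1' (by omega)
      refine ⟨P ++ [Ssum x xs (j-1) + (St x xs j).2], ?_, by simp; omega⟩
      rw [AM_succ, hP]
      have hcast2 : ((j+1 : Nat) : Int) - 2 = ((j - 1 : Nat) : Int) := by
        push_cast [Nat.cast_sub h1']; ring
      have hcast1 : ((j+1 : Nat) : Int) - 1 = ((j : Nat) : Int) := by push_cast; ring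
      rw [stepA, if_neg (by push_cast; omega), if_neg (by push_cast; omega),
          hcast2, hcast1]
      have hget2 : PySem.List.pyGetD (P ++ [Ssum x xs (j-1) + (St x xs j).2,
          Ssum x xs j + max (St x xs j).1 (St x xs j).2]) ((j - 1 : Nat) : Int) 0
          = Ssum x xs (j-1) + (St x xs j).2 := by
        rw [PySem.List.pyGetD_natCast, show (j - 1) = P.length by omega]
        simp [List.getD]
      have hget1 : PySem.List.pyGetD (P ++ [Ssum x xs (j-1) + (St x xs j).2,
          Ssum x xs j + max (St x xs j).1 (St x xs j).2]) ((j : Nat) : Int) 0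
          = Ssum x xs j + max (St x xs j).1 (St x xs j).2 := by
        rw [PySem.List.pyGetD_natCast, show j = P.length + 1 by omega]
        simp [List.getD]
      have ha1 : PySem.List.pyGetD (x :: xs) ((j+1 : Nat) : Int) 0 =
          (x :: xs).getD (j+1) 0 := PySem.List.pyGetD_natCast _ _ _
      have ha0 : PySem.List.pyGetD (x :: xs) ((j : Nat) : Int) 0 =
          (x :: xs).getD j 0 := PySem.List.pyGetD_natCast _ _ _
      rw [hget2, hget1, ha1, ha0]
      have hStep : St x xs (j+1) = ((St x xs j).2 +
          ((x :: xs).getD j 0 * (x :: xs).getD (j+1) 0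
            - (x :: xs).getD j 0 - (x :: xs).getD (j+1) 0),
          max (St x xs j).1 (St x xs j).2) := by
        rw [St_succ x xs j (by omega)]; rfl
      have hSs : Ssum x xs j = Ssum x xs (j - 1) + (x :: xs).getD j 0 := by
        have h2 := Ssum_succ x xs (j-1) (by omega)
        rw [show j - 1 + 1 = j by omega] at h2
        exact h2
      have hR1 : Ssum x xs (j + 1 - 1) + (St x xs (j+1)).2 =
          Ssum x xs j + max (St x xs j).1 (St x xs j).2 := by
        rw [hStep, show (j + 1 - 1) = j by omega]
      have hR2 : Ssum x xs (j + 1) +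
          max (St x xs (j+1)).1 (St x xs (j+1)).2 =
          max ((x :: xs).getD (j+1) 0 * (x :: xs).getD j 0 +
                (Ssum x xs (j-1) + (St x xs j).2))
              ((x :: xs).getD (j+1) 0 +
                (Ssum x xs j + max (St x xs j).1 (St x xs j).2)) := by
        rw [hStep, Ssum_succ x xs j (by omega), int_add_max]
        congr 1
        · rw [show Ssum x xs (j - 1) = Ssum x xs j - (x :: xs).getD j 0 by
            rw [hSs]; ring]
          ring
        · ring
      rw [hR1, hR2]
      simp

-- ===== VERDICT (by name: the statement is the Claim_ definition above) =====
theorem MaxProdSum_spec : Claim_equal_MaxProdSum := by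
  intro Array_ _hdom hpre
  unfold Spec_MaxProdSum
  obtain ⟨x, xs, rfl⟩ : ∃ x xs, Array_ = x :: xs := by
    cases Array_ with
    | nil => exact absurd rfl hpre
    | cons x xs => exact ⟨x, xs, rfl⟩
  cases xs with
  | nil =>
    simp [MaxProdSum, MaxProdSum_alt, gainsB, stepA, PySem.List.pyRange,
          PySem.List.pyGetD, PySem.List.pyGet?, PySem.List.pyIdx?]
  | cons y ys =>
    have hlen : (x :: y :: ys).length = ((y :: ys).length + 1 : Nat) := by simp
    have hA : MaxProdSum (x :: y :: ys) =
        PySem.List.pyGetD (AM (x :: y :: ys) ((y :: ys).length + 1)) (-1) 0 := by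
      unfold MaxProdSum AM
      rw [hlen]
    obtain ⟨P, hP, _⟩ := inv x (y :: ys) (y :: ys).length (by simp) le_rfl
    have hSt : ((gainsB (x :: y :: ys)).foldl stepB (0, 0)) =
        St x (y :: ys) (y :: ys).length := by
      unfold St
      rw [List.take_of_length_le (by simp [gainsB, List.length_zip])]
    have hSum : (x :: y :: ys).sum = Ssum x (y :: ys) (y :: ys).length := by
      unfold Ssum
      rw [List.take_of_length_le (by simp)]
    have hB : MaxProdSum_alt (x :: y :: ys) =
        Ssum x (y :: ys) (y :: ys).length +
          max (St x (y :: ys) (y :: ys).length).1 (St x (y :: ys) (y :: ys).length).2 := by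
      unfold MaxProdSum_alt
      rw [hSt, hSum]
    set v2 := Ssum x (y :: ys) (y :: ys).length +
        max (St x (y :: ys) (y :: ys).length).1 (St x (y :: ys) (y :: ys).length).2
    set v1 := Ssum x (y :: ys) ((y :: ys).length - 1) + (St x (y :: ys) (y :: ys).length).2
    rw [hA, hP, hB, show P ++ [v1, v2] = (P ++ [v1]) ++ [v2] by simp,
      PySem.List.pyGetD_neg_one_append_singleton]

@[simp]
theorem MaxProdSum_raises : Claim_raises_MaxProdSum := by
  unfold Claim_raises_MaxProdSum
  exact ⟨fun _ _ h => by simp [Raises_MaxProdSum] at h; simp [Pre_MaxProdSum, h], by decide⟩
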